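-- pv_equiv track=rewrite | github.com/pypi-data/pypi-mirror-354 | packages/dh-pyspark/dh_pyspark-0.4.2-py3-none-any.whl/services/_coreset_service_base.py | _get_orphan_for_level
-- ===== SOURCE A (Python) =====
-- def _get_orphan_for_level(n_leaves, level, leaf_factor):
--     """
--     Get list of orhan heads for certain level of the tree. Level=0 regarded as leaf level.
--     return a list of tuples (level_index, chunk_index), both indexes are starting from 0
--
--     We are suggesting that level - is level of coreset that we are interested in.
--     Therefore, all orphans are taken from levels below 'level' (closer to the leaves).
--     """
--     # list of levels, starting from leaf (index=0), ending on root.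
--     # for each level element represents a number of nodes
--     level_n_nodes = [n_leaves]
--     while level_n_nodes[-1] > 1:
--         level_n_nodes.append(level_n_nodes[-1] // leaf_factor)
--     # collect all orphan nodes (all nodes that do not have 'parent')
--     orphan_nodes = []
--     for level_index, node_count in enumerate(level_n_nodes):
--         if level_index < len(level_n_nodes) - 1:
--             # for leaf_factor > 2 there are could be more than one orphan node on the level
--             for node_shift_index in range(node_count % leaf_factor):
--                 orphan_nodes.append((level_index, node_count - 1 + node_shift_index))
--     # all orphans from below levels
--     return [node for node in orphan_nodes if node[0] < level]
-- ===== SOURCE B (Python) =====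
-- def _get_orphan_for_level(n_leaves, level, leaf_factor):
--     # Single streaming pass: walk down the level sizes directly, emitting orphans
--     # only while below the requested level; no intermediate list, no trailing filter.
--     orphans = []
--     current = n_leaves
--     level_index = 0
--     while current > 1:
--         if level_index < level:
--             for shift in range(current % leaf_factor):
--                 orphans.append((level_index, current - 1 + shift))
--         current //= leaf_factor
--         level_index += 1
--     return orphans
-- ===== Notes on version B (the rewrite author's own statement) =====
-- stated objective: simpler
-- what changed: Replaced the three-phase pipeline (build the full level-size list, fold over its enumeration to collect all orphans, then filter by level) with one streaming while-loop that tracks only the current level size and index and emits orphans guarded by the level bound, dropping the intermediate list and the trailing filter.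
import Mathlib
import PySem

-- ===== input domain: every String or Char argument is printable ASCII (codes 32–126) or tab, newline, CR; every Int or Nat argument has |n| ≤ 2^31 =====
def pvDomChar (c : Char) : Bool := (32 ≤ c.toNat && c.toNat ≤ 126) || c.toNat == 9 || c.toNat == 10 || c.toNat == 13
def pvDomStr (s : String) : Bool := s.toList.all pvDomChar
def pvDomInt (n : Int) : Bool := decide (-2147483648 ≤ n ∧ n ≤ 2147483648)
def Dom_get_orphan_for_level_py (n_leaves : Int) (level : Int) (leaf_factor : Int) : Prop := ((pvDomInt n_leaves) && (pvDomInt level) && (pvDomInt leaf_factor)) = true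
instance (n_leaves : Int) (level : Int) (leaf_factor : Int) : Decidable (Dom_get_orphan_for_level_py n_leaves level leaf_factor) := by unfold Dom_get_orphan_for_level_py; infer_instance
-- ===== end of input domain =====

-- B replaces A's build-list / collect / filter pipeline with one streaming loop over the
-- shrinking level size, for simplicity; return values agree wherever A terminates.

-- ===== PORT A =====
-- the while-loop building level_n_nodes: list starts at cur, appends cur // leaf_factor while last > 1
-- (fuel only makes the recursion total; Pre_ guarantees it never runs out)
def pvBuildLevels (f : Int) (cur : Int) (fuel : Nat) : List Int :=
  match fuel with
  | 0 => [cur]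
  | fuel + 1 =>
    if cur > 1 then cur :: pvBuildLevels f (PySem.Int.floordiv cur f) fuel else [cur]

def get_orphan_for_level_py (n_leaves : Int) (level : Int) (leaf_factor : Int) : List (Int × Int) :=
  let level_n_nodes := pvBuildLevels leaf_factor n_leaves (n_leaves.toNat + 1)
  let orphan_nodes := (PySem.List.enumerate level_n_nodes 0).foldl
    (fun acc p =>
      if p.1 < (level_n_nodes.length : Int) - 1 then
        acc ++ (PySem.List.pyRange 0 (PySem.Int.mod p.2 leaf_factor) 1).map (fun s => (p.1, p.2 - 1 + s))
      else acc) []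
  orphan_nodes.filter (fun node => decide (node.1 < level))

-- ===== PORT B =====
-- the streaming while-loop of Source B (fuel only makes it total; never exhausted under Pre_)
def pvOrphLoop (level : Int) (f : Int) (cur : Int) (i : Int) (acc : List (Int × Int)) (fuel : Nat) : List (Int × Int) :=
  match fuel with
  | 0 => acc
  | fuel + 1 =>
    if cur > 1 then
      let acc' := if i < level then
          acc ++ (PySem.List.pyRange 0 (PySem.Int.mod cur f) 1).map (fun s => (i, cur - 1 + s))
        else acc
      pvOrphLoop level f (PySem.Int.floordiv cur f) (i + 1) acc' fuel
    else acc

def get_orphan_for_level_py_alt (n_leaves : Int) (level : Int) (leaf_factor : Int) : List (Int × Int) :=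
  pvOrphLoop level leaf_factor n_leaves 0 [] (n_leaves.toNat + 1)

-- ===== PRECONDITION & SPEC =====
-- Pre_ excludes exactly the inputs where A does not return: with n_leaves > 1 the loop runs,
-- so leaf_factor = 0 raises ZeroDivisionError and leaf_factor = 1 never terminates
-- (with n_leaves ≤ 1 the loop never runs and A returns [] for every leaf_factor).
def Pre_get_orphan_for_level_py (n_leaves : Int) (_level : Int) (leaf_factor : Int) : Prop :=
  n_leaves ≤ 1 ∨ (leaf_factor ≠ 0 ∧ leaf_factor ≠ 1)
instance (n_leaves : Int) (level : Int) (leaf_factor : Int) : Decidable (Pre_get_orphan_for_level_py n_leaves level leaf_factor) := by unfold Pre_get_orphan_for_level_py; infer_instance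

def pvWitness_get_orphan_for_level_py : Int × Int × Int := (10, 2, 3)

def Spec_get_orphan_for_level_py (n_leaves : Int) (level : Int) (leaf_factor : Int) (out : List (Int × Int)) : Prop := out = get_orphan_for_level_py_alt n_leaves level leaf_factor
instance (n_leaves : Int) (level : Int) (leaf_factor : Int) (out : List (Int × Int)) : Decidable (Spec_get_orphan_for_level_py n_leaves level leaf_factor out) := by unfold Spec_get_orphan_for_level_py; infer_instance

-- ===== CLAIM (what is proved, stated in full; the proofs are below) =====
def Claim_equal_get_orphan_for_level_py : Prop := ∀ (n_leaves : Int) (level : Int) (leaf_factor : Int), Dom_get_orphan_for_level_py n_leaves level leaf_factor → Pre_get_orphan_for_level_py n_leaves level leaf_factor → Spec_get_orphan_for_level_py n_leaves level leaf_factor (get_orphan_for_level_py n_leaves level leaf_factor)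

-- ===== LEMMAS AND PROOFS =====

-- under Pre_, the next level size strictly loses fuel headroom (and f = 1 never recurses)
lemma pvNext_toNat_lt (f cur : Int) (hf : f ≠ 0) (hf1 : f = 1 → cur ≤ 1) (hcur : 1 < cur) :
    (PySem.Int.floordiv cur f).toNat < cur.toNat := by
  rcases lt_trichotomy f 0 with hneg | h0 | hpos
  · -- negative divisor: quotient is negative, toNat 0
    have hb := PySem.Int.mod_neg_bounds cur hneg
    have hq := PySem.Int.floordiv_mul_add_mod cur f
    have hqneg : PySem.Int.floordiv cur f < 0 := by
      by_contra h
      rw [not_lt] at h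
      nlinarith [mul_nonpos_of_nonneg_of_nonpos h (le_of_lt hneg)]
    omega
  · exact absurd h0 hf
  · -- positive divisor: f ≥ 2, quotient in [0, cur)
    have hf2 : 2 ≤ f := by
      rcases eq_or_lt_of_le (by omega : (1:Int) ≤ f) with h1 | h2
      · exact absurd h1.symm (fun h => by have := hf1 h; omega)
      · omega
    have h1 : 0 ≤ PySem.Int.floordiv cur f :=
      (PySem.Int.le_floordiv_iff_mul_le hpos).mpr (by nlinarith)
    have h2 : PySem.Int.floordiv cur f < cur :=
      (PySem.Int.floordiv_lt_iff_lt_mul hpos).mpr (by nlinarith)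
    omega

-- filtering the block emitted at level i by (·.1 < level) keeps all of it or none of it
lemma pvFilter_block (level f : Int) (i c : Int) :
    ((PySem.List.pyRange 0 (PySem.Int.mod c f) 1).map (fun s => (i, c - 1 + s))).filter
        (fun node => decide (node.1 < level))
      = if i < level then
          (PySem.List.pyRange 0 (PySem.Int.mod c f) 1).map (fun s => (i, c - 1 + s))
        else [] := by
  rw [List.filter_map]
  by_cases h : i < level
  · rw [if_pos h, List.filter_eq_self.mpr]
    intro a _
    simp [h]
  · rw [if_neg h, List.map_eq_nil_iff, List.filter_eq_nil_iff]
    intro a _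
    simp [h]

-- core correspondence: A's fold-then-filter over the level list equals B's streaming loop
lemma pvCore (level f : Int) (hf : f ≠ 0) :
    ∀ (fuel : Nat) (cur i : Int) (acc : List (Int × Int)),
      (f = 1 → cur ≤ 1) → cur.toNat < fuel →
      ((PySem.List.enumerate (pvBuildLevels f cur fuel) i).foldl
          (fun acc p =>
            if p.1 < i + ((pvBuildLevels f cur fuel).length : Int) - 1 then
              acc ++ (PySem.List.pyRange 0 (PySem.Int.mod p.2 f) 1).map (fun s => (p.1, p.2 - 1 + s))
            else acc) acc).filter (fun node => decide (node.1 < level))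
        = pvOrphLoop level f cur i (acc.filter (fun node => decide (node.1 < level))) fuel := by
  intro fuel
  induction fuel with
  | zero => intro cur i acc _ hlt; omega
  | succ fuel ih =>
    intro cur i acc hf1 hlt
    by_cases hcur : 1 < cur
    · -- loop body runs
      have hnext := pvNext_toNat_lt f cur hf hf1 hcur
      have hf1' : f = 1 → PySem.Int.floordiv cur f ≤ 1 := fun h => absurd (hf1 h) (by omega)
      have hbl : pvBuildLevels f cur (fuel + 1)
          = cur :: pvBuildLevels f (PySem.Int.floordiv cur f) fuel := by
        simp [pvBuildLevels, hcur]
      rw [hbl]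
      rw [PySem.List.enumerate_cons]
      simp only [List.foldl_cons, List.length_cons, Nat.cast_add, Nat.cast_one]
      have hpos0 : 0 < (pvBuildLevels f (PySem.Int.floordiv cur f) fuel).length := by
        cases fuel with
        | zero => simp [pvBuildLevels]
        | succ m => simp only [pvBuildLevels]; split <;> simp
      have hguard : i < i + (((pvBuildLevels f (PySem.Int.floordiv cur f) fuel).length : Int) + 1) - 1 := by
        omega
      rw [if_pos hguard]
      have hfun :
          (fun (a : List (Int × Int)) (p : Int × Int) =>
            if p.1 < i + (((pvBuildLevels f (PySem.Int.floordiv cur f) fuel).length : Int) + 1) - 1 then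
              a ++ (PySem.List.pyRange 0 (PySem.Int.mod p.2 f) 1).map (fun s => (p.1, p.2 - 1 + s))
            else a)
          = (fun (a : List (Int × Int)) (p : Int × Int) =>
            if p.1 < (i + 1) + ((pvBuildLevels f (PySem.Int.floordiv cur f) fuel).length : Int) - 1 then
              a ++ (PySem.List.pyRange 0 (PySem.Int.mod p.2 f) 1).map (fun s => (p.1, p.2 - 1 + s))
            else a) := by
        funext a p
        split_ifs with h1 h2 <;> first | rfl | omega
      rw [hfun]
      rw [ih (PySem.Int.floordiv cur f) (i + 1)
          (acc ++ (PySem.List.pyRange 0 (PySem.Int.mod cur f) 1).map (fun s => (i, cur - 1 + s)))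
          hf1' (by omega)]
      have hloop : pvOrphLoop level f cur i (acc.filter (fun node => decide (node.1 < level))) (fuel + 1)
          = pvOrphLoop level f (PySem.Int.floordiv cur f) (i + 1)
              (if i < level then
                 acc.filter (fun node => decide (node.1 < level))
                   ++ (PySem.List.pyRange 0 (PySem.Int.mod cur f) 1).map (fun s => (i, cur - 1 + s))
               else acc.filter (fun node => decide (node.1 < level))) fuel := by
        simp [pvOrphLoop, hcur]
      rw [hloop]
      congr 1
      rw [List.filter_append, pvFilter_block]
      split_ifs <;> simp
    · -- loop body does not run: single level, nothing emitted, filter of acc on both sides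
      have hbl : pvBuildLevels f cur (fuel + 1) = [cur] := by
        simp [pvBuildLevels, hcur]
      rw [hbl]
      simp only [PySem.List.enumerate_cons, PySem.List.enumerate_nil, List.foldl_cons,
        List.foldl_nil, List.length_singleton]
      rw [if_neg (by push_cast; omega)]
      simp [pvOrphLoop, hcur]

-- ===== VERDICT (by name: the statement is the Claim_ definition above) =====
theorem get_orphan_for_level_py_spec : Claim_equal_get_orphan_for_level_py := by
  intro n level f _ hpre
  unfold Spec_get_orphan_for_level_py get_orphan_for_level_py get_orphan_for_level_py_alt
  by_cases hf : f ≠ 0 ∧ f ≠ 1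
  · have := pvCore level f hf.1 (n.toNat + 1) n 0 [] (fun h => absurd h hf.2) (by omega)
    simpa using this
  · -- leaf_factor ∈ {0, 1}: Pre_ forces n_leaves ≤ 1, neither loop runs
    have hn : n ≤ 1 := by
      rcases hpre with hn | hok
      · exact hn
      · exact absurd hok hf
    have hnn : ¬ (1 : Int) < n := by omega
    simp [pvBuildLevels, pvOrphLoop, hnn, PySem.List.enumerate_cons]
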